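-- pv_equiv track=rewrite | github.com/vbukovska/SoftUni | Python_advanced/Ex3_multidimentional_lists/maximum_sum.py | sum_square_matrixes
-- ===== SOURCE A (Python) =====
-- def sum_square_matrixes(matrix, row, column, dim):
--     sum_elements = 0
--     sub_matrix = []
--     for r in range(row, row + dim):
--         for c in range(column, column + dim):
--             sum_elements += matrix[r][c]
--         sub_matrix.append(matrix[r][column:column + dim])
--     return sum_elements, sub_matrix
-- ===== SOURCE B (Python) =====
-- def sum_square_matrixes(matrix, row, column, dim):
--     sub_matrix = [[matrix[r][c] for c in range(column, column + dim)]
--                   for r in range(row, row + dim)]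
--     sum_elements = sum(sum(r) for r in sub_matrix)
--     return sum_elements, sub_matrix
-- ===== Notes on version B (the rewrite author's own statement) =====
-- stated objective: simpler
-- what changed: B builds the submatrix first by explicit element indexing (a nested comprehension) and then sums it in a separate pass, instead of A's single interleaved loop that sums element-by-element while appending slices.
-- intended difference: When column < 0 < column + dim (a negative column index whose window crosses the end-wraparound boundary), A sums the wrapped elements but returns submatrix rows taken with a slice that silently truncates (e.g. empty rows), while B returns the dim elements actually summed; B's consistent dim-wide rows are the intended submatrix. — e.g. on sum_square_matrixes([[1, 2], [3, 4]], 0, -1, 2): A returns (10, [[], []]), B returns (10, [[2, 1], [4, 3]])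
import Mathlib
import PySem

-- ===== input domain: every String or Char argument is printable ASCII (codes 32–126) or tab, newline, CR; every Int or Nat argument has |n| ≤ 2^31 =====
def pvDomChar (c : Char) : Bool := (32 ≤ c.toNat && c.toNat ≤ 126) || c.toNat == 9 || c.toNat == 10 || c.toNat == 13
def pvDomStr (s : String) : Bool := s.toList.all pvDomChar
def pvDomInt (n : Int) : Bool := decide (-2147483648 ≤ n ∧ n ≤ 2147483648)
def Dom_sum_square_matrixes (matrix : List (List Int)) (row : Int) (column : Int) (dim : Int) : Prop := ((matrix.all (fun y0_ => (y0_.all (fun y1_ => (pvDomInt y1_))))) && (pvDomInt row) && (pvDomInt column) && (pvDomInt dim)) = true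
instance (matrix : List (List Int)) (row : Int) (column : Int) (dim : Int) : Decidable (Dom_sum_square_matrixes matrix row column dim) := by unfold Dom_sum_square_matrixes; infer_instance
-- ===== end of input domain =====

-- B separates extraction from summation: it builds the submatrix first by explicit element
-- indexing and then sums it in a second pass, instead of A's single interleaved loop that
-- accumulates the sum element-by-element while appending slices (objective: simpler).

-- ===== PORT A =====
def sum_square_matrixes (matrix : List (List Int)) (row : Int) (column : Int) (dim : Int) : Int × List (List Int) :=
  -- sum_elements = 0; sub_matrix = []; for r in range(row, row+dim): …
  (PySem.List.pyRange row (row + dim) 1).foldl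
    (fun (st : Int × List (List Int)) r =>
      -- for c in range(column, column+dim): sum_elements += matrix[r][c]
      let s := (PySem.List.pyRange column (column + dim) 1).foldl
        (fun acc c => acc + PySem.List.pyGetD (PySem.List.pyGetD matrix r []) c 0) st.1
      -- sub_matrix.append(matrix[r][column:column+dim])
      (s, st.2 ++ [PySem.List.slice (PySem.List.pyGetD matrix r []) (some column) (some (column + dim))]))
    (0, [])

-- ===== PORT B =====
def sum_square_matrixes_alt (matrix : List (List Int)) (row : Int) (column : Int) (dim : Int) : Int × List (List Int) :=
  -- sub_matrix = [[matrix[r][c] for c in range(column, column+dim)] for r in range(row, row+dim)]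
  let sub := (PySem.List.pyRange row (row + dim) 1).map
    (fun r => (PySem.List.pyRange column (column + dim) 1).map
      (fun c => PySem.List.pyGetD (PySem.List.pyGetD matrix r []) c 0))
  -- sum_elements = sum(sum(r) for r in sub_matrix)
  let sum_elements := (sub.map (fun rw => rw.sum)).sum
  (sum_elements, sub)

-- ===== PRECONDITION & SPEC =====
-- Pre_ excludes exactly the inputs on which A raises IndexError: some row index r or some
-- column index c of the window is out of range for Python indexing.
def Pre_sum_square_matrixes (matrix : List (List Int)) (row : Int) (column : Int) (dim : Int) : Prop :=
  (0 < dim → -(matrix.length : Int) ≤ row ∧ row + dim ≤ (matrix.length : Int)) ∧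
  (0 < dim → ∀ j ∈ List.range matrix.length,
      ((row ≤ (j : Int) ∧ (j : Int) < row + dim) ∨
       (row ≤ (j : Int) - (matrix.length : Int) ∧ (j : Int) - (matrix.length : Int) < row + dim)) →
      -(((matrix.getD j []).length : Int)) ≤ column ∧ column + dim ≤ ((matrix.getD j []).length : Int))
instance (matrix : List (List Int)) (row : Int) (column : Int) (dim : Int) : Decidable (Pre_sum_square_matrixes matrix row column dim) := by
  unfold Pre_sum_square_matrixes; infer_instance

def pvWitness_sum_square_matrixes : List (List Int) × Int × Int × Int := ([[1, 2], [3, 4]], 0, 0, 2)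

-- When column < 0 ≤ column + dim (a negative column whose window reaches the end of the row),
-- A sums the wrapped elements but returns submatrix rows taken with a slice that silently
-- truncates (possibly to []), while B returns exactly the dim elements that were summed;
-- B's consistent dim-wide rows are the intended submatrix.
def D_sum_square_matrixes (matrix : List (List Int)) (row : Int) (column : Int) (dim : Int) : Prop :=
  0 < dim ∧ column < 0 ∧ 0 ≤ column + dim
instance (matrix : List (List Int)) (row : Int) (column : Int) (dim : Int) : Decidable (D_sum_square_matrixes matrix row column dim) := by
  unfold D_sum_square_matrixes; infer_instance

def Spec_sum_square_matrixes (matrix : List (List Int)) (row : Int) (column : Int) (dim : Int) (out : Int × List (List Int)) : Prop :=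
  ¬ D_sum_square_matrixes matrix row column dim → out = sum_square_matrixes_alt matrix row column dim
instance (matrix : List (List Int)) (row : Int) (column : Int) (dim : Int) (out : Int × List (List Int)) : Decidable (Spec_sum_square_matrixes matrix row column dim out) := by
  unfold Spec_sum_square_matrixes; infer_instance

def pvDiffWitness_sum_square_matrixes : List (List Int) × Int × Int × Int := ([[1, 2], [3, 4]], 0, -1, 2)
def pvDiffWitnessOut_sum_square_matrixes : (Int × List (List Int)) × (Int × List (List Int)) :=
  ((10, [[], []]), (10, [[2, 1], [4, 3]]))

-- ===== CLAIM (what is proved, stated in full; the proofs are below) =====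
def Claim_unchanged_sum_square_matrixes : Prop := ∀ (matrix : List (List Int)) (row : Int) (column : Int) (dim : Int), Dom_sum_square_matrixes matrix row column dim → Pre_sum_square_matrixes matrix row column dim → Spec_sum_square_matrixes matrix row column dim (sum_square_matrixes matrix row column dim)
def Claim_changed_sum_square_matrixes : Prop := Dom_sum_square_matrixes (pvDiffWitness_sum_square_matrixes.1) (pvDiffWitness_sum_square_matrixes.2.1) (pvDiffWitness_sum_square_matrixes.2.2.1) (pvDiffWitness_sum_square_matrixes.2.2.2) ∧ Pre_sum_square_matrixes (pvDiffWitness_sum_square_matrixes.1) (pvDiffWitness_sum_square_matrixes.2.1) (pvDiffWitness_sum_square_matrixes.2.2.1) (pvDiffWitness_sum_square_matrixes.2.2.2) ∧ D_sum_square_matrixes (pvDiffWitness_sum_square_matrixes.1) (pvDiffWitness_sum_square_matrixes.2.1) (pvDiffWitness_sum_square_matrixes.2.2.1) (pvDiffWitness_sum_square_matrixes.2.2.2) ∧ sum_square_matrixes (pvDiffWitness_sum_square_matrixes.1) (pvDiffWitness_sum_square_matrixes.2.1) (pvDiffWitness_sum_square_matrixes.2.2.1) (pvDiffWitness_sum_square_matrixes.2.2.2)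 = pvDiffWitnessOut_sum_square_matrixes.1 ∧ sum_square_matrixes_alt (pvDiffWitness_sum_square_matrixes.1) (pvDiffWitness_sum_square_matrixes.2.1) (pvDiffWitness_sum_square_matrixes.2.2.1) (pvDiffWitness_sum_square_matrixes.2.2.2) = pvDiffWitnessOut_sum_square_matrixes.2 ∧ pvDiffWitnessOut_sum_square_matrixes.1 ≠ pvDiffWitnessOut_sum_square_matrixes.2
def Claim_exact_sum_square_matrixes : Prop := ∀ (matrix : List (List Int)) (row : Int) (column : Int) (dim : Int), Dom_sum_square_matrixes matrix row column dim → Pre_sum_square_matrixes matrix row column dim → D_sum_square_matrixes matrix row column dim → sum_square_matrixes matrix row column dim ≠ sum_square_matrixes_alt matrix row column dim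

-- ===== LEMMAS AND PROOFS =====

-- slice with both bounds present, in clampIdx form
lemma pv_slice_def (L : List Int) (a b : Int) :
    PySem.List.slice L (some a) (some b)
      = (L.drop (PySem.List.clampIdx L.length a)).take
          (PySem.List.clampIdx L.length b - PySem.List.clampIdx L.length a) := rfl

lemma pv_clamp_nonneg (n : Nat) {i : Int} (h0 : 0 ≤ i) (h1 : i ≤ (n : Int)) :
    PySem.List.clampIdx n i = i.toNat := by
  unfold PySem.List.clampIdx; split_ifs <;> omega

lemma pv_clamp_neg (n : Nat) {i : Int} (h0 : i < 0) (h1 : -(n : Int) ≤ i) :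
    PySem.List.clampIdx n i = ((n : Int) + i).toNat := by
  unfold PySem.List.clampIdx; split_ifs <;> omega

-- A's outer loop, with the per-row sum already abstracted, unfolds to (sum, map)
lemma pv_foldl_sum_append (rs : List Int) (m : Int → Int) (g : Int → List Int) :
    ∀ (s : Int) (acc : List (List Int)),
      rs.foldl (fun (st : Int × List (List Int)) r => (st.1 + m r, st.2 ++ [g r])) (s, acc)
        = (s + (rs.map m).sum, acc ++ rs.map g) := by
  induction rs with
  | nil => intro s acc; simp
  | cons r rs ih => intro s acc; simp [ih, add_assoc]

-- negative index read, in the (length + i) form used below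
lemma pv_pyGetD_neg {α : Type} (L : List α) (i : Int) (d : α) (h1 : i < 0) (h2 : 0 ≤ (L.length : Int) + i) :
    PySem.List.pyGetD L i d = L[((L.length : Int) + i).toNat]'(by omega) := by
  have hk : i = -(((-i).toNat : Nat) : Int) := by omega
  have h := PySem.List.pyGetD_neg_natCast L (-i).toNat d (by omega) (by omega)
  rw [← hk] at h
  rw [h]
  simp only [show L.length - (-i).toNat = ((L.length : Int) + i).toNat from by omega]

-- Pre_ gives, for every visited row, validity of every visited column index
lemma pv_pre_cols (matrix : List (List Int)) (row column dim : Int)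
    (hPre : Pre_sum_square_matrixes matrix row column dim) {r : Int}
    (hr : r ∈ PySem.List.pyRange row (row + dim) 1) :
    ∀ c ∈ PySem.List.pyRange column (column + dim) 1,
      PySem.Raise.InRange (PySem.List.pyGetD matrix r []).length c := by
  intro c hc
  obtain ⟨hr1, hr2⟩ := PySem.List.mem_pyRange_one.mp hr
  obtain ⟨hc1, hc2⟩ := PySem.List.mem_pyRange_one.mp hc
  have hd : 0 < dim := by omega
  obtain ⟨hrows, hcols⟩ := hPre
  obtain ⟨hlo, hhi⟩ := hrows hd
  by_cases h0 : 0 ≤ r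
  · have hj : r.toNat < matrix.length := by omega
    have hget : PySem.List.pyGetD matrix r [] = matrix.getD r.toNat [] := by
      rw [PySem.List.pyGetD_eq_getElem matrix [] h0 (by omega), List.getD_eq_getElem _ _ hj]
    rw [hget]
    have hb := hcols hd r.toNat (List.mem_range.mpr hj) (Or.inl ⟨by omega, by omega⟩)
    exact ⟨by omega, by omega⟩
  · have hj : ((matrix.length : Int) + r).toNat < matrix.length := by omega
    have hget : PySem.List.pyGetD matrix r [] = matrix.getD ((matrix.length : Int) + r).toNat [] := by
      rw [pv_pyGetD_neg matrix r [] (by omega) (by omega),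
        List.getD_eq_getElem _ _ hj]
    rw [hget]
    have hb := hcols hd ((matrix.length : Int) + r).toNat (List.mem_range.mpr hj)
      (Or.inr ⟨by omega, by omega⟩)
    exact ⟨by omega, by omega⟩

-- the per-row fact: outside D_, the slice A appends is exactly the row B builds
lemma pv_row_eq (L : List Int) (column dim : Int) (hd : 0 < dim)
    (hv : ∀ c ∈ PySem.List.pyRange column (column + dim) 1, PySem.Raise.InRange L.length c)
    (hnd : ¬ (0 < dim ∧ column < 0 ∧ 0 ≤ column + dim)) :
    PySem.List.slice L (some column) (some (column + dim))
      = (PySem.List.pyRange column (column + dim) 1).map (fun c => PySem.List.pyGetD L c 0) := by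
  by_cases hc : 0 ≤ column
  · -- nonnegative window [column, column+dim) with column+dim ≤ length
    have hend : column + dim - 1 < (L.length : Int) :=
      (hv (column + dim - 1) (PySem.List.mem_pyRange_one.mpr (by omega))).2
    have hca := pv_clamp_nonneg L.length hc (by omega)
    have hcb := pv_clamp_nonneg L.length (show (0:Int) ≤ column + dim from by omega) (by omega)
    rw [pv_slice_def, hca, hcb]
    apply List.ext_getElem
    · simp only [List.length_take, List.length_drop, List.length_map,
        PySem.List.length_pyRange_one]
      omega
    · intro k h1 h2
      have hk : (k : Int) < dim := by
        simp only [List.length_map, PySem.List.length_pyRange_one] at h2; omega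
      simp only [List.getElem_take, List.getElem_drop, List.getElem_map,
        PySem.List.getElem_pyRange_one]
      rw [PySem.List.pyGetD_eq_getElem L 0 (by omega) (by omega)]
      simp only [show (column + (k : Int)).toNat = column.toNat + k from by omega]
  · -- negative window: column < 0 and (by hnd) column + dim < 0
    rw [not_le] at hc
    have hcd : column + dim < 0 := by
      by_contra hge; exact hnd ⟨hd, hc, by omega⟩
    have hlo : -(L.length : Int) ≤ column :=
      (hv column (PySem.List.mem_pyRange_one.mpr (by omega))).1
    have hca := pv_clamp_neg L.length hc hlo
    have hcb := pv_clamp_neg L.length hcd (by omega)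
    rw [pv_slice_def, hca, hcb]
    apply List.ext_getElem
    · simp only [List.length_take, List.length_drop, List.length_map,
        PySem.List.length_pyRange_one]
      omega
    · intro k h1 h2
      have hk : (k : Int) < dim := by
        simp only [List.length_map, PySem.List.length_pyRange_one] at h2; omega
      simp only [List.getElem_take, List.getElem_drop, List.getElem_map,
        PySem.List.getElem_pyRange_one]
      rw [pv_pyGetD_neg L (column + (k : Int)) 0 (by omega) (by omega)]
      simp only [show ((L.length : Int) + (column + (k : Int))).toNat
        = ((L.length : Int) + column).toNat + k from by omega]

-- both ports, written in the common (sum, rows) shape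
lemma pv_both (matrix : List (List Int)) (row column dim : Int)
    (hPre : Pre_sum_square_matrixes matrix row column dim)
    (hnd : ¬ D_sum_square_matrixes matrix row column dim) :
    sum_square_matrixes matrix row column dim = sum_square_matrixes_alt matrix row column dim := by
  unfold sum_square_matrixes sum_square_matrixes_alt
  simp only [PySem.List.foldl_add]
  rw [pv_foldl_sum_append]
  refine Prod.ext ?_ ?_
  · simp [List.map_map, Function.comp_def]
  · simp only [List.nil_append]
    refine List.map_congr_left ?_
    intro r hr
    have hd : 0 < dim := by
      have := PySem.List.mem_pyRange_one.mp hr; omega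
    exact pv_row_eq (PySem.List.pyGetD matrix r []) column dim hd
      (pv_pre_cols matrix row column dim hPre hr)
      (by unfold D_sum_square_matrixes at hnd; exact hnd)

-- inside D_, A's first slice is strictly shorter than dim, while B's first row has length dim
lemma pv_slice_short (L : List Int) (column dim : Int)
    (hv : ∀ c ∈ PySem.List.pyRange column (column + dim) 1, PySem.Raise.InRange L.length c)
    (hD : 0 < dim ∧ column < 0 ∧ 0 ≤ column + dim) :
    (PySem.List.slice L (some column) (some (column + dim))).length < dim.toNat := by
  obtain ⟨hd, hc, hcd⟩ := hD
  have hlo : -(L.length : Int) ≤ column :=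
    (hv column (PySem.List.mem_pyRange_one.mpr (by omega))).1
  have hend : column + dim - 1 < (L.length : Int) :=
    (hv (column + dim - 1) (PySem.List.mem_pyRange_one.mpr (by omega))).2
  have hca := pv_clamp_neg L.length hc hlo
  have hcb := pv_clamp_nonneg L.length hcd (by omega)
  rw [pv_slice_def, hca, hcb]
  simp only [List.length_take, List.length_drop]
  omega

-- ===== VERDICT (by name: the statement is the Claim_ definition above) =====
theorem sum_square_matrixes_spec : Claim_unchanged_sum_square_matrixes := by
  intro matrix row column dim _ hPre
  unfold Spec_sum_square_matrixes
  intro hnd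
  exact pv_both matrix row column dim hPre hnd

theorem sum_square_matrixes_changed : Claim_changed_sum_square_matrixes := by
  unfold Claim_changed_sum_square_matrixes; decide

theorem sum_square_matrixes_tight : Claim_exact_sum_square_matrixes := by
  intro matrix row column dim _ hPre hD heq
  have hD' := hD
  unfold D_sum_square_matrixes at hD'
  obtain ⟨hd, hc, hcd⟩ := hD'
  have h2 := congrArg Prod.snd heq
  unfold sum_square_matrixes sum_square_matrixes_alt at h2
  simp only [PySem.List.foldl_add] at h2
  rw [pv_foldl_sum_append] at h2
  simp only [List.nil_append] at h2
  have hmem : row ∈ PySem.List.pyRange row (row + dim) 1 :=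
    PySem.List.mem_pyRange_one.mpr (by omega)
  have hne : PySem.List.pyRange row (row + dim) 1 ≠ [] := List.ne_nil_of_mem hmem
  obtain ⟨r0, rs, hcons⟩ := List.exists_cons_of_ne_nil hne
  have hr0 : r0 ∈ PySem.List.pyRange row (row + dim) 1 := by
    rw [hcons]; exact List.mem_cons_self
  rw [hcons] at h2
  simp only [List.map_cons, List.cons.injEq] at h2
  have hshort := pv_slice_short (PySem.List.pyGetD matrix r0 []) column dim
    (pv_pre_cols matrix row column dim hPre hr0) ⟨hd, hc, hcd⟩
  have hlen := congrArg List.length h2.1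
  simp only [List.length_map, PySem.List.length_pyRange_one] at hlen
  omega
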